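-- pv_equiv track=rewrite | github.com/MikeYan01/HousePrice | padding.py | search_padding_dates
-- ===== SOURCE A (Python) =====
-- def search_padding_dates(convert_date, date_list):
--     result_date_list = []
--
--     # Only one record, and determine whether to pad date
--     if len(convert_date) == 1:
--         for each in date_list:
--             if each > convert_date[0]:
--                 result_date_list.append(each)
--
--     # Otherwise, check all records and determine where to pad date
--     else:
--         for i in range(0, len(convert_date)-1):
--             for each in date_list:
--                 if each > convert_date[i] and each < convert_date[i+1]:
--                     result_date_list.append(each)
--
--         for each in date_list:
--             if each > convert_date[len(convert_date)-1]:
--                 result_date_list.append(each)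
--
--     return result_date_list
-- ===== SOURCE B (Python) =====
-- def search_padding_dates(convert_date, date_list):
--     # One pass over date_list: assign each date to every interval bucket it falls in
--     # (and to the tail bucket when it lies past the last record), then concatenate
--     # the buckets in interval order.
--     n = len(convert_date)
--     buckets = [[] for _ in range(n)]
--     for d in date_list:
--         for i in range(n - 1):
--             if convert_date[i] < d < convert_date[i + 1]:
--                 buckets[i].append(d)
--         if d > convert_date[n - 1]:
--             buckets[n - 1].append(d)
--     result_date_list = []
--     for b in buckets:
--         result_date_list += b
--     return result_date_list
-- ===== Notes on version B (the rewrite author's own statement) =====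
-- stated objective: alternative
-- what changed: B swaps the traversal: instead of A rescanning date_list once per consecutive pair of records, B makes a single pass over date_list, dropping each date into per-interval bucket lists, and concatenates the buckets in interval order at the end.
import Mathlib
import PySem

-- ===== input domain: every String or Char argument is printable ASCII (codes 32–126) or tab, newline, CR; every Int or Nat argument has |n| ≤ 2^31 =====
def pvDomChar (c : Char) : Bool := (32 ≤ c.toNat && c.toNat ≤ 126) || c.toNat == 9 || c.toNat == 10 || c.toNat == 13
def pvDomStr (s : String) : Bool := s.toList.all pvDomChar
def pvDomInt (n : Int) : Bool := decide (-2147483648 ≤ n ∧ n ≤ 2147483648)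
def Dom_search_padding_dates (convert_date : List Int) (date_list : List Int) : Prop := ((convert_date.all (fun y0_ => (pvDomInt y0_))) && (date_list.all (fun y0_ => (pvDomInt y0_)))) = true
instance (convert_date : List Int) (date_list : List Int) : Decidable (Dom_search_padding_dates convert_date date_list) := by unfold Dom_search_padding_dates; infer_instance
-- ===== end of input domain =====

-- B makes a single pass over date_list, dropping each date into per-interval bucket lists that
-- are concatenated at the end, instead of A's rescan of date_list per consecutive record pair.


-- ===== PORT A =====
-- A's code step for step: per-interval rescans of date_list, then the dates past the last record.
def search_padding_dates (convert_date : List Int) (date_list : List Int) : List Int :=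
  if convert_date.length == 1 then
    date_list.foldl (fun acc each =>
      if PySem.List.pyGetD convert_date 0 0 < each then acc ++ [each] else acc) []
  else
    let r1 := (PySem.List.pyRange 0 ((convert_date.length : Int) - 1) 1).foldl (fun acc i =>
      date_list.foldl (fun acc2 each =>
        if PySem.List.pyGetD convert_date i 0 < each ∧
           each < PySem.List.pyGetD convert_date (i + 1) 0 then acc2 ++ [each] else acc2) acc) []
    date_list.foldl (fun acc each =>
      if PySem.List.pyGetD convert_date ((convert_date.length : Int) - 1) 0 < each
      then acc ++ [each] else acc) r1

-- ===== PORT B =====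
def search_padding_dates_alt (convert_date : List Int) (date_list : List Int) : List Int :=
  let n := convert_date.length
  -- buckets = [[] for _ in range(n)]
  let buckets0 : List (List Int) := (List.range n).map (fun _ => ([] : List Int))
  -- for d in date_list: for i in range(n-1): …; if d > convert_date[n-1]: …
  let buckets := date_list.foldl (fun bs d =>
    let bs1 := (List.range (n - 1)).foldl (fun bs i =>
      if convert_date.getD i 0 < d ∧ d < convert_date.getD (i + 1) 0
      then bs.set i (bs.getD i [] ++ [d]) else bs) bs
    if convert_date.getD (n - 1) 0 < d
    then bs1.set (n - 1) (bs1.getD (n - 1) [] ++ [d]) else bs1) buckets0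
  -- result_date_list = []; for b in buckets: result_date_list += b
  buckets.foldl (fun out b => out ++ b) []

-- ===== PRECONDITION & SPEC =====
-- Pre_ excludes exactly the inputs on which A raises IndexError: empty convert_date with a
-- nonempty date_list (convert_date[len(convert_date)-1] is out of range there).
def Pre_search_padding_dates (convert_date : List Int) (date_list : List Int) : Prop :=
  convert_date ≠ [] ∨ date_list = []
instance (convert_date : List Int) (date_list : List Int) : Decidable (Pre_search_padding_dates convert_date date_list) := by unfold Pre_search_padding_dates; infer_instance

def pvWitness_search_padding_dates : List Int × List Int := ([1, 9, 5], [2, 10, 3, 7, 5])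

def Spec_search_padding_dates (convert_date : List Int) (date_list : List Int) (out : List Int) : Prop := out = search_padding_dates_alt convert_date date_list
instance (convert_date : List Int) (date_list : List Int) (out : List Int) : Decidable (Spec_search_padding_dates convert_date date_list out) := by unfold Spec_search_padding_dates; infer_instance

-- ===== CLAIM (what is proved, stated in full; the proofs are below) =====
def Claim_equal_search_padding_dates : Prop := ∀ (convert_date : List Int) (date_list : List Int), Dom_search_padding_dates convert_date date_list → Pre_search_padding_dates convert_date date_list → Spec_search_padding_dates convert_date date_list (search_padding_dates convert_date date_list)

-- ===== LEMMAS AND PROOFS =====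

-- the bucket predicate: date d belongs to bucket b (interval b, or the tail bucket b = n-1)
def pvPredB (a : List Int) (b : Nat) (d : Int) : Bool :=
  (decide (b + 1 < a.length) && decide (a.getD b 0 < d ∧ d < a.getD (b + 1) 0)) ||
  (decide (b + 1 = a.length) && decide (a.getD b 0 < d))

-- B's per-date step, named for the lemmas (definitionally the foldl body of the port)
def pvInner (a : List Int) (bs : List (List Int)) (d : Int) : List (List Int) :=
  (List.range (a.length - 1)).foldl (fun bs i =>
    if a.getD i 0 < d ∧ d < a.getD (i + 1) 0
    then bs.set i (bs.getD i [] ++ [d]) else bs) bs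

def pvStep (a : List Int) (bs : List (List Int)) (d : Int) : List (List Int) :=
  if a.getD (a.length - 1) 0 < d
  then (pvInner a bs d).set (a.length - 1) ((pvInner a bs d).getD (a.length - 1) [] ++ [d])
  else pvInner a bs d

theorem getD_set_self {α : Type} (xs : List α) (i : Nat) (v dflt : α) (h : i < xs.length) :
    (xs.set i v).getD i dflt = v := by
  rw [List.getD_eq_getElem?_getD, List.getElem?_set, if_pos rfl, if_pos h]
  rfl

theorem getD_set_ne {α : Type} (xs : List α) (i j : Nat) (v dflt : α) (h : i ≠ j) :
    (xs.set i v).getD j dflt = xs.getD j dflt := by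
  rw [List.getD_eq_getElem?_getD, List.getElem?_set, if_neg h, ← List.getD_eq_getElem?_getD]

theorem inner_fold (a : List Int) (d : Int) (k : Nat) (hk : k ≤ a.length)
    (bs : List (List Int)) (hlen : bs.length = a.length) :
    ((List.range k).foldl (fun bs i =>
        if a.getD i 0 < d ∧ d < a.getD (i + 1) 0
        then bs.set i (bs.getD i [] ++ [d]) else bs) bs).length = a.length ∧
    ∀ b : Nat, ((List.range k).foldl (fun bs i =>
        if a.getD i 0 < d ∧ d < a.getD (i + 1) 0
        then bs.set i (bs.getD i [] ++ [d]) else bs) bs).getD b []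
      = bs.getD b [] ++ (if b < k ∧ a.getD b 0 < d ∧ d < a.getD (b + 1) 0 then [d] else []) := by
  induction k with
  | zero => simp [hlen]
  | succ k ih =>
    obtain ⟨ihl, ihg⟩ := ih (by omega)
    rw [List.range_succ]
    simp only [List.foldl_append, List.foldl_cons, List.foldl_nil]
    constructor
    · by_cases hc : a.getD k 0 < d ∧ d < a.getD (k + 1) 0
      · rw [if_pos hc, List.length_set]; exact ihl
      · rw [if_neg hc]; exact ihl
    · intro b
      by_cases hc : a.getD k 0 < d ∧ d < a.getD (k + 1) 0
      · rw [if_pos hc]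
        by_cases hb : k = b
        · subst hb
          rw [getD_set_self _ _ _ _ (by rw [ihl]; omega), ihg k]
          have hnot : ¬ (k < k ∧ a.getD k 0 < d ∧ d < a.getD (k + 1) 0) := by
            rintro ⟨h1, _⟩; omega
          rw [if_neg hnot, if_pos ⟨by omega, hc⟩, List.append_nil]
        · rw [getD_set_ne _ _ _ _ _ hb, ihg b]
          have : (b < k ∧ a.getD b 0 < d ∧ d < a.getD (b + 1) 0)
              ↔ (b < k + 1 ∧ a.getD b 0 < d ∧ d < a.getD (b + 1) 0) := by
            constructor
            · rintro ⟨h1, h2⟩; exact ⟨by omega, h2⟩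
            · rintro ⟨h1, h2⟩; exact ⟨by omega, h2⟩
          rw [if_congr this rfl rfl]
      · rw [if_neg hc, ihg b]
        congr 1
        by_cases hb : k = b
        · subst hb
          rw [if_neg (by tauto), if_neg (by rintro ⟨h1, h2⟩; exact hc h2)]
        · have : (b < k ∧ a.getD b 0 < d ∧ d < a.getD (b + 1) 0)
              ↔ (b < k + 1 ∧ a.getD b 0 < d ∧ d < a.getD (b + 1) 0) := by
            constructor
            · rintro ⟨h1, h2⟩; exact ⟨by omega, h2⟩
            · rintro ⟨h1, h2⟩
              exact ⟨by omega, h2⟩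
          rw [if_congr this rfl rfl]

theorem pvStep_length (a : List Int) (bs : List (List Int)) (d : Int)
    (hlen : bs.length = a.length) :
    (pvStep a bs d).length = a.length := by
  unfold pvStep pvInner
  obtain ⟨ihl, _⟩ := inner_fold a d (a.length - 1) (by omega) bs hlen
  by_cases hc : a.getD (a.length - 1) 0 < d
  · rw [if_pos hc, List.length_set]; exact ihl
  · rw [if_neg hc]; exact ihl

theorem pvStep_getD (a : List Int) (bs : List (List Int)) (d : Int) (b : Nat)
    (hlen : bs.length = a.length) :
    (pvStep a bs d).getD b [] = bs.getD b [] ++ (if pvPredB a b d then [d] else []) := by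
  unfold pvStep pvInner
  obtain ⟨ihl, ihg⟩ := inner_fold a d (a.length - 1) (by omega) bs hlen
  rcases Nat.eq_zero_or_pos a.length with h0 | hpos
  · -- a = [] : bs = [], everything is []
    have hbs : bs = [] := List.length_eq_zero_iff.mp (by omega)
    subst hbs
    have hp : pvPredB a b d = false := by
      simp only [pvPredB]
      have h1 : ¬ (b + 1 < a.length) := by omega
      have h2 : ¬ (b + 1 = a.length) := by omega
      simp [h1, h2]
    simp only [h0, Nat.zero_sub, List.range_zero, List.foldl_nil, hp]
    by_cases hc : a.getD 0 0 < d
    · rw [if_pos (by simpa [h0] using hc)]; rfl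
    · rw [if_neg (by simpa [h0] using hc)]
      simp
  · by_cases hb : a.length - 1 = b
    · -- the tail bucket
      subst hb
      have hnotlt : ¬ (a.length - 1 < a.length - 1 ∧
          a.getD (a.length - 1) 0 < d ∧ d < a.getD (a.length - 1 + 1) 0) := by
        rintro ⟨h1, _⟩; omega
      have hp : pvPredB a (a.length - 1) d = decide (a.getD (a.length - 1) 0 < d) := by
        simp only [pvPredB]
        have h2 : a.length - 1 + 1 = a.length := by omega
        simp [h2]
      rw [hp]
      by_cases hc : a.getD (a.length - 1) 0 < d
      · rw [if_pos hc, getD_set_self _ _ _ _ (by rw [ihl]; omega), ihg _, if_neg hnotlt]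
        have hc' : a[a.length - 1]?.getD 0 < d := by
          simpa [List.getD_eq_getElem?_getD] using hc
        simp [hc']
      · rw [if_neg hc, ihg _, if_neg hnotlt, List.append_nil]
        have hc' : ¬ a[a.length - 1]?.getD 0 < d := by
          simpa [List.getD_eq_getElem?_getD] using hc
        simp [hc']
    · -- an interval bucket (or out of range)
      have hp : pvPredB a b d
          = decide (b < a.length - 1 ∧ a.getD b 0 < d ∧ d < a.getD (b + 1) 0) := by
        simp only [pvPredB]
        have h2 : ¬ (b + 1 = a.length) := by omega
        by_cases h1 : b + 1 < a.length
        · have h1' : b < a.length - 1 := by omega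
          simp [h1, h2, h1']
        · have h1' : ¬ b < a.length - 1 := by omega
          simp [h1, h2, h1']
      have hgoal : ∀ bs1 : List (List Int),
          bs1.getD b [] = bs.getD b []
            ++ (if b < a.length - 1 ∧ a.getD b 0 < d ∧ d < a.getD (b + 1) 0 then [d] else []) →
          (if a.getD (a.length - 1) 0 < d
            then bs1.set (a.length - 1) (bs1.getD (a.length - 1) [] ++ [d]) else bs1).getD b []
          = bs.getD b [] ++ (if pvPredB a b d then [d] else []) := by
        intro bs1 hbs1
        rw [hp]
        by_cases hc : a.getD (a.length - 1) 0 < d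
        · rw [if_pos hc, getD_set_ne _ _ _ _ _ hb, hbs1]
          simp
        · rw [if_neg hc, hbs1]
          simp
      exact hgoal _ (ihg b)

theorem bucket_fold (a : List Int) (dl : List Int) (bs : List (List Int))
    (hlen : bs.length = a.length) :
    (dl.foldl (pvStep a) bs).length = a.length ∧
    ∀ b : Nat, (dl.foldl (pvStep a) bs).getD b []
      = bs.getD b [] ++ dl.filter (pvPredB a b) := by
  induction dl generalizing bs with
  | nil => simp [hlen]
  | cons d dl ih =>
    simp only [List.foldl_cons]
    have hlen' : (pvStep a bs d).length = a.length := pvStep_length a bs d hlen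
    obtain ⟨ihl, ihg⟩ := ih _ hlen'
    refine ⟨ihl, fun b => ?_⟩
    rw [ihg b, pvStep_getD a bs d b hlen, List.append_assoc, List.filter_cons]
    by_cases hp : pvPredB a b d <;> simp [hp]

theorem alt_eq_flatMap (a dl : List Int) :
    search_padding_dates_alt a dl
      = (List.range a.length).flatMap (fun b => dl.filter (pvPredB a b)) := by
  have h0 : search_padding_dates_alt a dl
      = (dl.foldl (pvStep a) ((List.range a.length).map (fun _ => ([] : List Int)))).foldl
          (fun out b => out ++ b) [] := rfl
  rw [h0]
  obtain ⟨hl, hg⟩ := bucket_fold a dl ((List.range a.length).map (fun _ => ([] : List Int)))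
    (by simp)
  have hbuck : dl.foldl (pvStep a) ((List.range a.length).map (fun _ => ([] : List Int)))
      = (List.range a.length).map (fun b => dl.filter (pvPredB a b)) := by
    apply List.ext_getElem
    · simpa using hl
    · intro i h1 h2
      have hgd := hg i
      rw [List.getD_eq_getElem _ _ h1] at hgd
      have hinit : ((List.range a.length).map (fun _ => ([] : List Int))).getD i [] = [] := by
        rcases Nat.lt_or_ge i a.length with h | h
        · rw [List.getD_eq_getElem _ _ (by simpa using h)]; simp
        · exact List.getD_eq_default _ _ (by simpa using h)
      rw [hinit] at hgd
      simpa using hgd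
  rw [hbuck]
  rw [PySem.List.foldl_append_eq_flatMap (fun b => b)]
  simp [List.flatMap_map]

theorem main_eq (c dl : List Int) (hne : c ≠ [] ∨ dl = []) :
    search_padding_dates c dl = search_padding_dates_alt c dl := by
  rw [alt_eq_flatMap]
  rcases eq_or_ne c [] with hc | hc
  · subst hc
    rcases hne with h | h
    · exact absurd rfl h
    · subst h; rfl
  · have hn1 : 1 ≤ c.length := List.length_pos_iff.mpr hc
    unfold search_padding_dates
    by_cases hl : c.length = 1
    · rw [if_pos (by simp [hl])]
      rw [PySem.List.foldl_append_ite_eq_filter (fun each => PySem.List.pyGetD c 0 0 < each) dl []]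
      have hrange : List.range c.length = [0] := by rw [hl]; rfl
      rw [hrange]
      simp only [List.flatMap_cons, List.flatMap_nil, List.append_nil, List.nil_append]
      apply List.filter_congr
      intro x _
      rw [Bool.eq_iff_iff]
      simp only [pvPredB, PySem.List.pyGetD_ofNat', hl]
      simp
    · rw [if_neg (by simp [hl])]
      obtain ⟨m, hm⟩ : ∃ m, c.length = m + 1 := ⟨c.length - 1, by omega⟩
      have hcast : ((c.length : Int) - 1) = ((m : Nat) : Int) := by omega
      rw [hcast, PySem.List.pyRange_one]
      simp only [Int.sub_zero, Int.toNat_natCast, List.foldl_map, Int.zero_add]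
      simp only [← Nat.cast_add_one, PySem.List.pyGetD_natCast]
      simp only [PySem.List.foldl_append_ite_eq_filter]
      simp only [PySem.List.foldl_append_eq_flatMap, List.nil_append]
      rw [hm, List.range_succ, List.flatMap_append]
      simp only [List.flatMap_cons, List.flatMap_nil, List.append_nil]
      congr 1
      · apply List.flatMap_congr
        intro k hk
        have hklt : k + 1 < c.length := by
          rw [hm]; have := List.mem_range.mp hk; omega
        apply List.filter_congr
        intro x _
        rw [Bool.eq_iff_iff]
        simp only [pvPredB, decide_eq_true_eq]
        have h2 : ¬ (k + 1 = c.length) := by omega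
        simp [hklt, h2]
      · apply List.filter_congr
        intro x _
        rw [Bool.eq_iff_iff]
        simp only [pvPredB, decide_eq_true_eq]
        have h2 : m + 1 = c.length := by omega
        simp [h2]

-- ===== VERDICT (by name: the statement is the Claim_ definition above) =====
theorem search_padding_dates_spec : Claim_equal_search_padding_dates := by
  intro convert_date date_list _ hpre
  unfold Spec_search_padding_dates
  exact main_eq convert_date date_list hpre
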